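-- pv_equiv track=rewrite | github.com/remiprograming/OMRemi | staff.py | isTopStaffLine
-- ===== SOURCE A (Python) =====
-- def isTopStaffLine(rho,rhoValues,gap,threshold):
-- 	for i in range(1,5):
-- 		member = False
-- 		for j in range(0,threshold+1):
-- 			if ((rho + i*gap + j) in rhoValues or (rho + i*gap - j) in rhoValues):
-- 				member = True
-- 		if (not(member)):
-- 			return False
-- 	return True
-- ===== SOURCE B (Python) =====
-- def isTopStaffLine(rho, rhoValues, gap, threshold):
--     # One pass over rhoValues per line: a value supports line i iff it lies
--     # within `threshold` of the expected position rho + i*gap.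
--     return all(any(abs(v - (rho + i * gap)) <= threshold for v in rhoValues)
--                for i in range(1, 5))
-- ===== Notes on version B (the rewrite author's own statement) =====
-- stated objective: faster
-- what changed: Instead of probing, for each of the 4 lines, every offset j in [0,threshold] for list membership, B makes a single pass over rhoValues per line testing abs(v - expected) <= threshold.
import Mathlib
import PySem

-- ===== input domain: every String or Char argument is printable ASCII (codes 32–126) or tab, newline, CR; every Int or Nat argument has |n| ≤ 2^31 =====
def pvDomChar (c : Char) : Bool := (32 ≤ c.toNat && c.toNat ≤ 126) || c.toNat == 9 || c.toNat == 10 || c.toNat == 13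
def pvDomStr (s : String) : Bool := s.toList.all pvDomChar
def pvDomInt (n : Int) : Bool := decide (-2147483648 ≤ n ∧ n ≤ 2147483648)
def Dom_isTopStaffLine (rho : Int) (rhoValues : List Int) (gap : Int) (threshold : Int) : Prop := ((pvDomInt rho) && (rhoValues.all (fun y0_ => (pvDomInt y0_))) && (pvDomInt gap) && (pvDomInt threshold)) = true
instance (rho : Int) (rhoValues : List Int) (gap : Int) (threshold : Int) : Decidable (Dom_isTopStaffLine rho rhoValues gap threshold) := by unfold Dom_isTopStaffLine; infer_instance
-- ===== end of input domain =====

-- B replaces A's inner scan over all offsets j in [0, threshold] by one pass over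
-- rhoValues testing |v - expected| <= threshold; objective: faster when threshold is large.

-- ===== PORT A =====
-- the outer for-loop with its early `return False`
def isTopALoop (rho : Int) (rhoValues : List Int) (gap : Int) (threshold : Int) : List Int → Bool
  | [] => true
  | i :: rest =>
    let member := (PySem.List.pyRange 0 (threshold+1) 1).foldl
      (fun member j =>
        if rhoValues.contains (rho + i*gap + j) || rhoValues.contains (rho + i*gap - j)
        then true else member) false
    if !member then false else isTopALoop rho rhoValues gap threshold rest

def isTopStaffLine (rho : Int) (rhoValues : List Int) (gap : Int) (threshold : Int) : Bool :=
  isTopALoop rho rhoValues gap threshold (PySem.List.pyRange 1 5 1)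

-- ===== PORT B =====
def isTopStaffLine_alt (rho : Int) (rhoValues : List Int) (gap : Int) (threshold : Int) : Bool :=
  (PySem.List.pyRange 1 5 1).all
    (fun i => rhoValues.any (fun v => decide (|v - (rho + i*gap)| ≤ threshold)))

-- ===== PRECONDITION & SPEC =====
def Spec_isTopStaffLine (rho : Int) (rhoValues : List Int) (gap : Int) (threshold : Int) (out : Bool) : Prop := out = isTopStaffLine_alt rho rhoValues gap threshold
instance (rho : Int) (rhoValues : List Int) (gap : Int) (threshold : Int) (out : Bool) : Decidable (Spec_isTopStaffLine rho rhoValues gap threshold out) := by unfold Spec_isTopStaffLine; infer_instance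

-- ===== CLAIM (what is proved, stated in full; the proofs are below) =====
def Claim_equal_isTopStaffLine : Prop := ∀ (rho : Int) (rhoValues : List Int) (gap : Int) (threshold : Int), Dom_isTopStaffLine rho rhoValues gap threshold → Spec_isTopStaffLine rho rhoValues gap threshold (isTopStaffLine rho rhoValues gap threshold)

-- ===== LEMMAS AND PROOFS =====

-- A's inner fold (set member on a hit, never reset) is a disjunction over the range
theorem foldl_if_true (p : Int → Bool) (l : List Int) (b : Bool) :
    l.foldl (fun m j => if p j then true else m) b = (b || l.any p) := by
  induction l generalizing b with
  | nil => simp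
  | cons a l ih =>
    simp only [List.foldl_cons, List.any_cons, ih]
    cases h : p a <;> simp

-- offset-scan membership over [0, threshold] = distance test against rhoValues
theorem inner_eq (rhoValues : List Int) (t threshold : Int) :
    (PySem.List.pyRange 0 (threshold+1) 1).any
      (fun j => rhoValues.contains (t + j) || rhoValues.contains (t - j))
    = rhoValues.any (fun v => decide (|v - t| ≤ threshold)) := by
  rw [Bool.eq_iff_iff]
  simp only [List.any_eq_true, PySem.List.mem_pyRange_one, List.contains_eq_mem,
    Bool.or_eq_true, decide_eq_true_eq]
  constructor
  · rintro ⟨j, ⟨hj0, hj1⟩, hv | hv⟩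
    · exact ⟨t + j, hv, by rw [abs_le]; omega⟩
    · exact ⟨t - j, hv, by rw [abs_le]; omega⟩
  · rintro ⟨v, hv, habs⟩
    rw [abs_le] at habs
    rcases le_total t v with hle | hle
    · refine ⟨v - t, ⟨by omega, by omega⟩, Or.inl ?_⟩
      have : t + (v - t) = v := by ring
      rw [this]; exact hv
    · refine ⟨t - v, ⟨by omega, by omega⟩, Or.inr ?_⟩
      have : t - (t - v) = v := by ring
      rw [this]; exact hv

-- A's early-return loop is List.all of the per-line check
theorem loop_eq_all (rho : Int) (rhoValues : List Int) (gap : Int) (threshold : Int)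
    (is : List Int) :
    isTopALoop rho rhoValues gap threshold is
    = is.all (fun i => rhoValues.any (fun v => decide (|v - (rho + i*gap)| ≤ threshold))) := by
  induction is with
  | nil => rfl
  | cons i rest ih =>
    rw [isTopALoop, List.all_cons, ih]
    rw [foldl_if_true, Bool.false_or, inner_eq]
    cases rhoValues.any (fun v => decide (|v - (rho + i*gap)| ≤ threshold)) <;> simp

-- ===== VERDICT (by name: the statement is the Claim_ definition above) =====
theorem isTopStaffLine_spec : Claim_equal_isTopStaffLine := by
  intro rho rhoValues gap threshold _
  unfold Spec_isTopStaffLine isTopStaffLine isTopStaffLine_alt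
  exact loop_eq_all rho rhoValues gap threshold _
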